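-- pv_equiv track=rewrite | github.com/FilipStefaniuk/MIMUW-DL | assignments/assignment3/brackets.py | statistics
-- ===== SOURCE A (Python) =====
-- def statistics(brackets):
--     max_open, curr_open = 0, 0
--     max_consecutive, curr_consecutive = 0, 0
--     max_diff, curr_diff = 0, 0
--
--     for c in brackets:
--         if c == '(':
--             curr_open += 1
--             max_open = max(max_open, curr_open)
--
--             curr_consecutive += 1
--             max_consecutive = max(max_consecutive, curr_consecutive)
--
--             curr_diff += 1
--
--         elif c == ')':
--             curr_open -= 1
--             curr_consecutive = 0
--
--             if curr_open == 0:
--                 max_diff = max(max_diff, curr_diff)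
--                 curr_diff = 0
--             else:
--                 curr_diff += 1
--
--     return max_open, max_consecutive, max_diff
-- ===== SOURCE B (Python) =====
-- def statistics(brackets):
--     bs = [c for c in brackets if c == '(' or c == ')']
--
--     pref = []
--     bal = 0
--     for c in bs:
--         bal += 1 if c == '(' else -1
--         pref.append(bal)
--
--     max_open = 0
--     for b in pref:
--         if b > max_open:
--             max_open = b
--
--     closers = [i for i, (c, b) in enumerate(zip(bs, pref)) if c == ')']
--     zeros = [i for i, (c, b) in enumerate(zip(bs, pref)) if c == ')' and b == 0]
--
--     max_consecutive = 0
--     prev = -1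
--     for i in closers + [len(bs)]:
--         if i - prev - 1 > max_consecutive:
--             max_consecutive = i - prev - 1
--         prev = i
--
--     max_diff = 0
--     prev = -1
--     for i in zeros:
--         if i - prev - 1 > max_diff:
--             max_diff = i - prev - 1
--         prev = i
--
--     return max_open, max_consecutive, max_diff
-- ===== Notes on version B (the rewrite author's own statement) =====
-- stated objective: alternative
-- what changed: Replaces A's single six-variable state-machine fold with a pipeline: filter to bracket characters, build the prefix-balance list, then derive each statistic independently - max_open as the maximum prefix balance, and max_consecutive / max_diff as maximal gaps between index lists (positions of closing brackets, and of balance-zero closing brackets).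
import Mathlib
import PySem

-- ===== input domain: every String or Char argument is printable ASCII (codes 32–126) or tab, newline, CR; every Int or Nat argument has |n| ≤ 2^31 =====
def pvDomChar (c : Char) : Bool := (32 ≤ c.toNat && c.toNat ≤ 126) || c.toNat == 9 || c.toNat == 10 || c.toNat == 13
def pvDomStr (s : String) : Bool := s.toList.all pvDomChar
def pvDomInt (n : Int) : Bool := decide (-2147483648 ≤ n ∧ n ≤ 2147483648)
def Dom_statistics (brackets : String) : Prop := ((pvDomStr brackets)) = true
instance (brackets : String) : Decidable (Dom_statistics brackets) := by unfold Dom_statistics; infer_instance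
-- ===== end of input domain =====

-- B recomputes the same three statistics by a filter / prefix-balance / index-gap pipeline
-- instead of A's single six-variable fold (objective: alternative decomposition, same cost).

-- ===== PORT A =====
-- state: (max_open, curr_open, max_consecutive, curr_consecutive, max_diff, curr_diff)
def stepA (s : Int × Int × Int × Int × Int × Int) (c : Char) : Int × Int × Int × Int × Int × Int :=
  let (mo, co, mc, cc, md, cd) := s
  if c = '(' then
    (max mo (co + 1), co + 1, max mc (cc + 1), cc + 1, md, cd + 1)
  else if c = ')' then
    if co - 1 = 0 then (mo, co - 1, mc, 0, max md cd, 0)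
    else (mo, co - 1, mc, 0, md, cd + 1)
  else s

def statistics (brackets : String) : Int × Int × Int :=
  let r := brackets.toList.foldl stepA (0, 0, 0, 0, 0, 0)
  (r.1, r.2.2.1, r.2.2.2.2.1)

-- ===== PORT B =====
-- pref list: the Python loop 'bal += ±1; pref.append(bal)'
def bprefs (bal : Int) : List Char → List Int
  | [] => []
  | c :: t =>
    let b := bal + (if c == '(' then 1 else -1)
    b :: bprefs b t

-- the gap loop 'for i in is: if i - prev - 1 > m: m = i - prev - 1; prev = i'
def bgap (m prev : Int) : List Int → Int
  | [] => m
  | i :: t => bgap (if i - prev - 1 > m then i - prev - 1 else m) i t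

def statistics_alt (brackets : String) : Int × Int × Int :=
  let bs := brackets.toList.filter (fun c => c == '(' || c == ')')
  let pref := bprefs 0 bs
  let maxOpen := pref.foldl (fun m b => if b > m then b else m) 0
  let ez := PySem.List.enumerate (bs.zip pref) 0
  let closers := (ez.filter (fun p => p.2.1 == ')')).map (·.1)
  let zeros := (ez.filter (fun p => p.2.1 == ')' && p.2.2 == 0)).map (·.1)
  let maxConsecutive := bgap 0 (-1) (closers ++ [(bs.length : Int)])
  let maxDiff := bgap 0 (-1) zeros
  (maxOpen, maxConsecutive, maxDiff)

-- ===== PRECONDITION & SPEC =====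
def Spec_statistics (brackets : String) (out : Int × Int × Int) : Prop := out = statistics_alt brackets
instance (brackets : String) (out : Int × Int × Int) : Decidable (Spec_statistics brackets out) := by unfold Spec_statistics; infer_instance

-- ===== CLAIM (what is proved, stated in full; the proofs are below) =====
def Claim_equal_statistics : Prop := ∀ (brackets : String), Dom_statistics brackets → Spec_statistics brackets (statistics brackets)

-- ===== LEMMAS AND PROOFS =====

-- mini-folds: A's fold restricted to each component group (on bracket-only lists)
def foldMO (mo co : Int) : List Char → Int
  | [] => mo
  | c :: t => if c = '(' then foldMO (max mo (co + 1)) (co + 1) t else foldMO mo (co - 1) t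

def foldMC (mc cc : Int) : List Char → Int
  | [] => mc
  | c :: t => if c = '(' then foldMC (max mc (cc + 1)) (cc + 1) t else foldMC mc 0 t

def foldMD (md cd co : Int) : List Char → Int
  | [] => md
  | c :: t =>
    if c = '(' then foldMD md (cd + 1) (co + 1) t
    else if co - 1 = 0 then foldMD (max md cd) 0 (co - 1) t
    else foldMD md (cd + 1) (co - 1) t

-- index lists, recursively
def closersAux (k : Int) : List Char → List Int
  | [] => []
  | c :: t => if c == ')' then k :: closersAux (k + 1) t else closersAux (k + 1) t

def zerosAux (k bal : Int) : List Char → List Int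
  | [] => []
  | c :: t =>
    let b := bal + (if c == '(' then 1 else -1)
    if c == ')' && b == 0 then k :: zerosAux (k + 1) b t else zerosAux (k + 1) b t

lemma stepA_skip (s : Int × Int × Int × Int × Int × Int) (c : Char)
    (h1 : c ≠ '(') (h2 : c ≠ ')') : stepA s c = s := by
  obtain ⟨mo, co, mc, cc, md, cd⟩ := s
  simp [stepA, h1, h2]

lemma foldl_filter_stepA (l : List Char) (s : Int × Int × Int × Int × Int × Int) :
    l.foldl stepA s = (l.filter (fun c => c == '(' || c == ')')).foldl stepA s := by
  induction l generalizing s with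
  | nil => rfl
  | cons c t ih =>
    by_cases h1 : c = '('
    · simp [h1, ih]
    · by_cases h2 : c = ')'
      · simp [h2, ih]
      · simp [h1, h2, stepA_skip _ _ h1 h2, ih]

lemma projMO (l : List Char) (mo co mc cc md cd : Int)
    (hB : ∀ c ∈ l, c = '(' ∨ c = ')') :
    (l.foldl stepA (mo, co, mc, cc, md, cd)).1 = foldMO mo co l := by
  induction l generalizing mo co mc cc md cd with
  | nil => rfl
  | cons c t ih =>
    have hBt : ∀ c ∈ t, c = '(' ∨ c = ')' := fun x hx => hB x (List.mem_cons_of_mem _ hx)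
    rcases hB c List.mem_cons_self with h | h
    · simp [h, stepA, foldMO, ih _ _ _ _ _ _ hBt]
    · by_cases h0 : co - 1 = 0 <;> simp [h, h0, stepA, foldMO, ih _ _ _ _ _ _ hBt]

lemma projMC (l : List Char) (mo co mc cc md cd : Int)
    (hB : ∀ c ∈ l, c = '(' ∨ c = ')') :
    (l.foldl stepA (mo, co, mc, cc, md, cd)).2.2.1 = foldMC mc cc l := by
  induction l generalizing mo co mc cc md cd with
  | nil => rfl
  | cons c t ih =>
    have hBt : ∀ c ∈ t, c = '(' ∨ c = ')' := fun x hx => hB x (List.mem_cons_of_mem _ hx)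
    rcases hB c List.mem_cons_self with h | h
    · simp [h, stepA, foldMC, ih _ _ _ _ _ _ hBt]
    · by_cases h0 : co - 1 = 0 <;> simp [h, h0, stepA, foldMC, ih _ _ _ _ _ _ hBt]

lemma projMD (l : List Char) (mo co mc cc md cd : Int)
    (hB : ∀ c ∈ l, c = '(' ∨ c = ')') :
    (l.foldl stepA (mo, co, mc, cc, md, cd)).2.2.2.2.1 = foldMD md cd co l := by
  induction l generalizing mo co mc cc md cd with
  | nil => rfl
  | cons c t ih =>
    have hBt : ∀ c ∈ t, c = '(' ∨ c = ')' := fun x hx => hB x (List.mem_cons_of_mem _ hx)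
    rcases hB c List.mem_cons_self with h | h
    · simp [h, stepA, foldMD, ih _ _ _ _ _ _ hBt]
    · by_cases h0 : co - 1 = 0 <;> simp [h, h0, stepA, foldMD, ih _ _ _ _ _ _ hBt]

-- B side: the running-max over the prefix-balance list is foldMO
lemma bmax_prefs (l : List Char) (m bal : Int) (h : bal ≤ m) :
    (bprefs bal l).foldl (fun m b => if b > m then b else m) m = foldMO m bal l := by
  have hf : (fun (m b : Int) => if b > m then b else m) = fun m b => max m b := by
    funext m b; split_ifs <;> omega
  rw [hf]
  induction l generalizing m bal with
  | nil => rfl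
  | cons c t ih =>
    by_cases hc : c = '('
    · simp only [bprefs, hc, List.foldl_cons]
      simp only [beq_self_eq_true, if_true]
      rw [ih _ _ (le_max_right m (bal + 1))]
      simp [foldMO]
    · have hd : (c == '(') = false := by simp [hc]
      simp only [bprefs, hd, List.foldl_cons, if_false, Bool.false_eq_true]
      have : max m (bal + -1) = m := by omega
      rw [this, ih _ _ (by omega)]
      rw [show bal + -1 = bal - 1 from by ring]
      simp [foldMO, hc]

-- unfolding lemmas for the gap loop, with the running max made explicit
lemma bgap_cons (m prev i : Int) (t : List Int) :
    bgap m prev (i :: t) = bgap (max m (i - prev - 1)) i t := by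
  rw [bgap]
  congr 1
  split_ifs <;> omega

-- the enumerate/zip/filter/map comprehensions equal the recursive index lists
lemma closers_eq (l : List Char) (k bal : Int) :
    ((PySem.List.enumerate (l.zip (bprefs bal l)) k).filter (fun p => p.2.1 == ')')).map (·.1)
      = closersAux k l := by
  induction l generalizing k bal with
  | nil => rfl
  | cons c t ih =>
    by_cases hc : c = ')'
    <;> simp [bprefs, PySem.List.enumerate_cons, hc, closersAux, ih]

lemma zeros_eq (l : List Char) (k bal : Int) :
    ((PySem.List.enumerate (l.zip (bprefs bal l)) k).filter (fun p => p.2.1 == ')' && p.2.2 == 0)).map (·.1)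
      = zerosAux k bal l := by
  induction l generalizing k bal with
  | nil => rfl
  | cons c t ih =>
    by_cases hc : c = ')'
    · subst hc
      by_cases hb : bal + -1 = 0
      <;> simp [bprefs, PySem.List.enumerate_cons, zerosAux, hb, ih]
    · simp [bprefs, PySem.List.enumerate_cons, zerosAux, hc, ih]

-- gap loop over the ')'-positions (with final sentinel) is foldMC
lemma bgap_closers (l : List Char) (k prev m : Int) (hm : 0 ≤ m)
    (hB : ∀ c ∈ l, c = '(' ∨ c = ')') :
    bgap m prev (closersAux k l ++ [k + l.length]) = foldMC (max m (k - prev - 1)) (k - prev - 1) l := by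
  induction l generalizing k prev m with
  | nil =>
    simp [closersAux, bgap_cons, bgap, foldMC]
  | cons c t ih =>
    have hBt : ∀ c ∈ t, c = '(' ∨ c = ')' := fun x hx => hB x (List.mem_cons_of_mem _ hx)
    have hlen : k + ((c :: t).length : Int) = (k + 1) + (t.length : Int) := by
      push_cast [List.length_cons]; ring
    rcases hB c List.mem_cons_self with h | h
    · rw [show closersAux k (c :: t) = closersAux (k + 1) t from by simp [closersAux, h],
          hlen, ih (k + 1) prev m hm hBt]
      simp only [foldMC, h, if_pos]
      congr 1 <;> omega
    · rw [show closersAux k (c :: t) = k :: closersAux (k + 1) t from by simp [closersAux, h],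
          List.cons_append, bgap_cons, hlen,
          ih (k + 1) k (max m (k - prev - 1)) (le_trans hm (le_max_left _ _)) hBt]
      have hnp : c ≠ '(' := by rw [h]; decide
      simp only [foldMC, if_neg hnp]
      congr 1 <;> omega

-- gap loop over the balance-zero ')'-positions is foldMD
lemma bgap_zeros (l : List Char) (k prev m co : Int)
    (hB : ∀ c ∈ l, c = '(' ∨ c = ')') :
    bgap m prev (zerosAux k co l) = foldMD m (k - prev - 1) co l := by
  induction l generalizing k prev m co with
  | nil => rfl
  | cons c t ih =>
    have hBt : ∀ c ∈ t, c = '(' ∨ c = ')' := fun x hx => hB x (List.mem_cons_of_mem _ hx)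
    rcases hB c List.mem_cons_self with h | h
    · rw [show zerosAux k co (c :: t) = zerosAux (k + 1) (co + 1) t from by simp [zerosAux, h],
          ih (k + 1) prev m (co + 1) hBt]
      simp only [foldMD, h, if_pos]
      congr 1 <;> omega
    · have hnp : c ≠ '(' := by rw [h]; decide
      by_cases h0 : co - 1 = 0
      · rw [show zerosAux k co (c :: t) = k :: zerosAux (k + 1) (co - 1) t from by
              simp [zerosAux, h, show co + -1 = co - 1 from by ring, h0],
            bgap_cons, ih (k + 1) k (max m (k - prev - 1)) (co - 1) hBt]
        simp only [foldMD, if_neg hnp, if_pos h0]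
        congr 1 <;> omega
      · rw [show zerosAux k co (c :: t) = zerosAux (k + 1) (co - 1) t from by
              simp [zerosAux, h, show co + -1 = co - 1 from by ring, h0],
            ih (k + 1) prev m (co - 1) hBt]
        simp only [foldMD, if_neg hnp, if_neg h0]
        congr 1 <;> omega

lemma statistics_eq_alt (brackets : String) : statistics brackets = statistics_alt brackets := by
  simp only [statistics, statistics_alt]
  have hB : ∀ c ∈ brackets.toList.filter (fun c => c == '(' || c == ')'), c = '(' ∨ c = ')' := by
    intro c hc
    have := List.of_mem_filter hc
    simpa using this
  rw [foldl_filter_stepA]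
  set bs := brackets.toList.filter (fun c => c == '(' || c == ')') with hbs
  refine Prod.ext ?_ (Prod.ext ?_ ?_)
  · rw [projMO bs 0 0 0 0 0 0 hB, bmax_prefs bs 0 0 le_rfl]
  · rw [projMC bs 0 0 0 0 0 0 hB, closers_eq bs 0 0,
        show ((bs.length : Int)) = 0 + (bs.length : Int) from by ring,
        bgap_closers bs 0 (-1) 0 le_rfl hB]
    norm_num
  · rw [projMD bs 0 0 0 0 0 0 hB, zeros_eq bs 0 0, bgap_zeros bs 0 (-1) 0 0 hB]
    norm_num

-- ===== VERDICT (by name: the statement is the Claim_ definition above) =====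
theorem statistics_spec : Claim_equal_statistics := by
  intro brackets _
  unfold Spec_statistics
  exact statistics_eq_alt brackets
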